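-- pv_equiv track=rewrite | github.com/sedeeki/Tree-Data-Structure-Python | Palindrome.py | construct_a_longest_palindrome
-- ===== SOURCE A (Python) =====
-- def construct_a_longest_palindrome(numbers_bank):
--     queue = []
--     stack = []
--     dict = {}
--     for i in numbers_bank:           # adds values to queue and duplicates to stack
--         if i in dict:
--             dict[i] = dict[i] + 1
--             if (dict[i]%2 == 0):
--                 stack.append(i)
--             else:
--                 queue.append(i)
--         else:
--             queue.append(i)
--             dict[i] = 1
--
--
--     mid = None
--     for i in range(len(queue)):       # gets any mid point which is not a duplicate
--         temp = queue.pop(0)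
--         if (dict[temp]%2 == 1 and mid == None):
--             mid = temp
--
--     palindrome = []
--     for i in range(len(stack)): # appends the duplicates into the palindrome list and queue
--         temp = stack.pop()
--         palindrome.append(temp)
--         queue.append(temp)
--
--     palindrome.append(mid)   # appends mid point onto the palindrome
--
--     for i in range(len(queue)):   # appends queue in stack again for reverse order
--         stack.append(queue.pop(0))
--
--     for i in range(len(stack)):   # appends palindrome with reverse order
--         palindrome.append(stack.pop())
--
--     return palindrome
-- ===== SOURCE B (Python) =====
-- def construct_a_longest_palindrome(numbers_bank):
--     # One pass: count occurrences and record one copy per completed pair,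
--     # then pick the first value with odd total count as middle; O(n).
--     counts = {}
--     pairs = []
--     for x in numbers_bank:
--         c = counts.get(x, 0) + 1
--         counts[x] = c
--         if c % 2 == 0:
--             pairs.append(x)
--     mid = None
--     for x in numbers_bank:
--         if counts[x] % 2 == 1:
--             mid = x
--             break
--     return pairs[::-1] + [mid] + pairs
-- ===== Notes on version B (the rewrite author's own statement) =====
-- stated objective: faster
-- what changed: Replaces A's five queue/stack shuffling loops with repeated list.pop(0) by a single counting pass that collects one copy per completed pair plus a find-first-odd scan, assembling the result as pairs[::-1] + [mid] + pairs.
import Mathlib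
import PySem

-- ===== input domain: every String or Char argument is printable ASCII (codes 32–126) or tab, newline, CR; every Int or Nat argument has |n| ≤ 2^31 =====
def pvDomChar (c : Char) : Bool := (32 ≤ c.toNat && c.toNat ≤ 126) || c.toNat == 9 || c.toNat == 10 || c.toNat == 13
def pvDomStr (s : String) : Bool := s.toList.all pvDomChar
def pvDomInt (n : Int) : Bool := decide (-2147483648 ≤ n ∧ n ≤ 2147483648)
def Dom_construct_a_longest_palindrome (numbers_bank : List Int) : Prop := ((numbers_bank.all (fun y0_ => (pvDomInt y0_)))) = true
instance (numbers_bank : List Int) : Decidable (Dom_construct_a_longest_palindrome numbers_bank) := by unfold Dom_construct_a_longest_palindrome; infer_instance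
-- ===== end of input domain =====

-- B replaces A's five queue/stack loops with repeated pop(0) by one counting pass plus a find-first-odd scan (objective: faster).

-- ===== PORT A =====
-- first loop: split input into queue (odd occurrences) and stack (completed pairs), counting in dict
def pvA_loop1 : List Int → List Int × List Int × PySem.Dict Int Int → List Int × List Int × PySem.Dict Int Int
  | [], st => st
  | i :: rest, (queue, stack, d) =>
    match d.get? i with
    | some v =>
      let d' := d.insert i (v + 1)
      if PySem.Int.mod (d'.getD i 0) 2 == 0 then
        pvA_loop1 rest (queue, stack ++ [i], d')
      else
        pvA_loop1 rest (queue ++ [i], stack, d')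
    | none => pvA_loop1 rest (queue ++ [i], stack, d.insert i 1)

-- second loop: pops every element of queue; dict[temp] never raises since temp was counted (getD is exact here)
def pvA_loop2 (d : PySem.Dict Int Int) : List Int → Option Int → Option Int
  | [], mid => mid
  | t :: rest, mid =>
    if PySem.Int.mod (d.getD t 0) 2 == 1 && mid == none then pvA_loop2 d rest (some t)
    else pvA_loop2 d rest mid

-- third loop: pops stack from the back, appending each popped value to palindrome and queue
def pvA_loop3 : List Int → List (Option Int) → List Int → List (Option Int) × List Int
  | [], pal, q => (pal, q)
  | a :: s, pal, q =>
    let t := (a :: s).getLast (List.cons_ne_nil a s)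
    pvA_loop3 (a :: s).dropLast (pal ++ [some t]) (q ++ [t])
termination_by s => s.length
decreasing_by simp

-- fourth loop: pops queue from the front into stack
def pvA_loop4 : List Int → List Int → List Int
  | [], s => s
  | t :: rest, s => pvA_loop4 rest (s ++ [t])

-- fifth loop: pops stack from the back into palindrome
def pvA_loop5 : List Int → List (Option Int) → List (Option Int)
  | [], pal => pal
  | a :: s, pal =>
    pvA_loop5 (a :: s).dropLast (pal ++ [some ((a :: s).getLast (List.cons_ne_nil a s))])
termination_by s => s.length
decreasing_by simp

def construct_a_longest_palindrome (numbers_bank : List Int) : List (Option Int) :=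
  let r := pvA_loop1 numbers_bank ([], [], PySem.Dict.empty)
  let queue := r.1
  let stack := r.2.1
  let d := r.2.2
  let mid := pvA_loop2 d queue none
  let r3 := pvA_loop3 stack [] []
  let palindrome := r3.1 ++ [mid]
  let stack' := pvA_loop4 r3.2 []
  pvA_loop5 stack' palindrome

-- ===== PORT B =====
-- one pass: counts.get(x,0)+1; one copy per completed pair goes to pairs
def pvB_count : List Int → PySem.Dict Int Int × List Int → PySem.Dict Int Int × List Int
  | [], st => st
  | x :: rest, (counts, pairs) =>
    let c := counts.getD x 0 + 1
    let counts' := counts.insert x c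
    if PySem.Int.mod c 2 == 0 then pvB_count rest (counts', pairs ++ [x])
    else pvB_count rest (counts', pairs)

-- 'for x in numbers_bank: if counts[x] % 2 == 1: mid = x; break'
def pvB_mid (counts : PySem.Dict Int Int) : List Int → Option Int
  | [] => none
  | x :: rest => if PySem.Int.mod (counts.getD x 0) 2 == 1 then some x else pvB_mid counts rest

def construct_a_longest_palindrome_alt (numbers_bank : List Int) : List (Option Int) :=
  let r := pvB_count numbers_bank (PySem.Dict.empty, [])
  let counts := r.1
  let pairs := r.2
  let mid := pvB_mid counts numbers_bank
  -- pairs[::-1] + [mid] + pairs  (slice? … (-1) = reverse, PySem.List.slice?_none_none_neg_one)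
  ((PySem.List.slice? pairs none none (-1)).getD []).map some ++ [mid] ++ pairs.map some

-- ===== PRECONDITION & SPEC =====
def Spec_construct_a_longest_palindrome (numbers_bank : List Int) (out : List (Option Int)) : Prop := out = construct_a_longest_palindrome_alt numbers_bank
instance (numbers_bank : List Int) (out : List (Option Int)) : Decidable (Spec_construct_a_longest_palindrome numbers_bank out) := by unfold Spec_construct_a_longest_palindrome; infer_instance

-- ===== CLAIM (what is proved, stated in full; the proofs are below) =====
def Claim_equal_construct_a_longest_palindrome : Prop := ∀ (numbers_bank : List Int), Dom_construct_a_longest_palindrome numbers_bank → Spec_construct_a_longest_palindrome numbers_bank (construct_a_longest_palindrome numbers_bank)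

-- ===== LEMMAS AND PROOFS =====

-- the predicate "final count of x is odd"
def pvOdd (d : PySem.Dict Int Int) (x : Int) : Bool := PySem.Int.mod (d.getD x 0) 2 == 1

theorem pvA_loop2_some (d : PySem.Dict Int Int) (q : List Int) (m : Int) :
    pvA_loop2 d q (some m) = some m := by
  induction q with
  | nil => rfl
  | cons t rest ih => simp [pvA_loop2, ih]

theorem pvA_loop2_eq_find (d : PySem.Dict Int Int) (q : List Int) :
    pvA_loop2 d q none = q.find? (pvOdd d) := by
  induction q with
  | nil => rfl
  | cons t rest ih =>
    by_cases h : d.getD t 0 % 2 = 1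
    · simp [pvA_loop2, pvOdd, h, pvA_loop2_some, List.find?]
    · have h2 : (d.getD t 0 % 2 == 1) = false := by simp [h]
      simp [pvA_loop2, pvOdd, h2, ih, List.find?]

theorem pvB_mid_eq_find (d : PySem.Dict Int Int) (q : List Int) :
    pvB_mid d q = q.find? (pvOdd d) := by
  induction q with
  | nil => rfl
  | cons t rest ih =>
    by_cases h : d.getD t 0 % 2 = 1
    · simp [pvB_mid, pvOdd, h, List.find?]
    · have h2 : (d.getD t 0 % 2 == 1) = false := by simp [h]
      simp [pvB_mid, pvOdd, h2, ih, List.find?]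

theorem pvA_loop3_step (s : List Int) (h : s ≠ []) (pal : List (Option Int)) (q : List Int) :
    pvA_loop3 s pal q = pvA_loop3 s.dropLast (pal ++ [some (s.getLast h)]) (q ++ [s.getLast h]) := by
  match s with
  | a :: s' => simp only [pvA_loop3]

theorem pvA_loop3_eq (s : List Int) : ∀ (pal : List (Option Int)) (q : List Int),
    pvA_loop3 s pal q = (pal ++ s.reverse.map some, q ++ s.reverse) := by
  induction s using List.reverseRecOn with
  | nil => intro pal q; simp [pvA_loop3]
  | append_singleton s a ih =>
    intro pal q
    rw [pvA_loop3_step (s ++ [a]) (by simp)]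
    simp [ih]

theorem pvA_loop4_eq (q : List Int) : ∀ (s : List Int), pvA_loop4 q s = s ++ q := by
  induction q with
  | nil => intro s; simp [pvA_loop4]
  | cons t rest ih => intro s; simp [pvA_loop4, ih]

theorem pvA_loop5_step (s : List Int) (h : s ≠ []) (pal : List (Option Int)) :
    pvA_loop5 s pal = pvA_loop5 s.dropLast (pal ++ [some (s.getLast h)]) := by
  match s with
  | a :: s' => simp only [pvA_loop5]

theorem pvA_loop5_eq (s : List Int) : ∀ (pal : List (Option Int)),
    pvA_loop5 s pal = pal ++ s.reverse.map some := by
  induction s using List.reverseRecOn with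
  | nil => intro pal; simp [pvA_loop5]
  | append_singleton s a ih =>
    intro pal
    rw [pvA_loop5_step (s ++ [a]) (by simp)]
    simp [ih]

-- main invariant: the two first passes build the same dict and the same stack/pairs list,
-- and find?-first-odd over the produced queue equals find?-first-odd over the consumed input
theorem pv_main_inv (t : List Int) :
    ∀ (qa sa pa : List Int) (d : PySem.Dict Int Int),
    (∀ x : Int, d.getD x 0 ≠ 0 → x ∈ pa) →
    (∀ x : Int, 0 ≤ d.getD x 0) →
    pvB_count t (d, sa) = ((pvA_loop1 t (qa, sa, d)).2.2, (pvA_loop1 t (qa, sa, d)).2.1) ∧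
    ((qa.find? (pvOdd (pvA_loop1 t (qa, sa, d)).2.2) = pa.find? (pvOdd (pvA_loop1 t (qa, sa, d)).2.2)) →
      (pvA_loop1 t (qa, sa, d)).1.find? (pvOdd (pvA_loop1 t (qa, sa, d)).2.2)
        = (pa ++ t).find? (pvOdd (pvA_loop1 t (qa, sa, d)).2.2)) := by
  induction t with
  | nil =>
    intro qa sa pa d h1 h2
    exact ⟨rfl, fun hq => by simpa using hq⟩
  | cons x rest ih =>
    intro qa sa pa d h1 h2
    have hA : pvA_loop1 (x :: rest) (qa, sa, d) =
        (if (d.getD x 0 + 1) % 2 = 0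
          then pvA_loop1 rest (qa, sa ++ [x], d.insert x (d.getD x 0 + 1))
          else pvA_loop1 rest (qa ++ [x], sa, d.insert x (d.getD x 0 + 1))) := by
      cases hg : d.get? x with
      | some v =>
        have hv : d.getD x 0 = v := by simp [PySem.Dict.getD, hg]
        by_cases hp : (v + 1) % 2 = 0 <;>
          simp [pvA_loop1, hg, hv, hp, PySem.Dict.getD_insert_self]
      | none =>
        have h0 : d.getD x 0 = 0 := by simp [PySem.Dict.getD, hg]
        simp [pvA_loop1, hg, h0]
    have hBstep : pvB_count (x :: rest) (d, sa) =
        (if (d.getD x 0 + 1) % 2 = 0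
          then pvB_count rest (d.insert x (d.getD x 0 + 1), sa ++ [x])
          else pvB_count rest (d.insert x (d.getD x 0 + 1), sa)) := by
      by_cases hp : (d.getD x 0 + 1) % 2 = 0 <;> simp [pvB_count, hp]
    have h2' : ∀ y : Int, 0 ≤ (d.insert x (d.getD x 0 + 1)).getD y 0 := by
      intro y
      by_cases hy : y = x
      · subst hy; rw [PySem.Dict.getD_insert_self]; have := h2 y; omega
      · rw [PySem.Dict.getD_insert_of_ne _ _ _ hy]; exact h2 y
    have h1' : ∀ y : Int, (d.insert x (d.getD x 0 + 1)).getD y 0 ≠ 0 → y ∈ pa ++ [x] := by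
      intro y hy
      by_cases hyx : y = x
      · subst hyx; simp
      · rw [PySem.Dict.getD_insert_of_ne _ _ _ hyx] at hy
        exact List.mem_append_left _ (h1 y hy)
    by_cases hp : (d.getD x 0 + 1) % 2 = 0
    · -- completed pair: x goes to both stacks
      rw [hA, hBstep, if_pos hp, if_pos hp]
      obtain ⟨ihB, ihF⟩ := ih qa (sa ++ [x]) (pa ++ [x]) (d.insert x (d.getD x 0 + 1)) h1' h2'
      refine ⟨ihB, ?_⟩
      intro hq
      have hxpa : x ∈ pa := by
        apply h1 x
        have := h2 x
        omega
      have hq' : List.find? (pvOdd (pvA_loop1 rest (qa, sa ++ [x], d.insert x (d.getD x 0 + 1))).2.2) qa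
          = List.find? (pvOdd (pvA_loop1 rest (qa, sa ++ [x], d.insert x (d.getD x 0 + 1))).2.2) (pa ++ [x]) := by
        rw [List.find?_append]
        cases hpa : List.find? (pvOdd (pvA_loop1 rest (qa, sa ++ [x], d.insert x (d.getD x 0 + 1))).2.2) pa with
        | some y => rw [hq, hpa]; rfl
        | none =>
          have hnx : ¬ pvOdd (pvA_loop1 rest (qa, sa ++ [x], d.insert x (d.getD x 0 + 1))).2.2 x = true :=
            List.find?_eq_none.mp hpa x hxpa
          rw [hq, hpa]
          simp [List.find?, Bool.eq_false_iff.mpr hnx]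
      have := ihF hq'
      simpa using this
    · -- odd occurrence: x goes to the queue / nowhere in B
      rw [hA, hBstep, if_neg hp, if_neg hp]
      obtain ⟨ihB, ihF⟩ := ih (qa ++ [x]) sa (pa ++ [x]) (d.insert x (d.getD x 0 + 1)) h1' h2'
      refine ⟨ihB, ?_⟩
      intro hq
      have hq' : List.find? (pvOdd (pvA_loop1 rest (qa ++ [x], sa, d.insert x (d.getD x 0 + 1))).2.2) (qa ++ [x])
          = List.find? (pvOdd (pvA_loop1 rest (qa ++ [x], sa, d.insert x (d.getD x 0 + 1))).2.2) (pa ++ [x]) := by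
        rw [List.find?_append, List.find?_append, hq]
      have := ihF hq'
      simpa using this

theorem construct_a_longest_palindrome_spec : Claim_equal_construct_a_longest_palindrome := by
  intro nb _
  unfold Spec_construct_a_longest_palindrome construct_a_longest_palindrome construct_a_longest_palindrome_alt
  obtain ⟨hB, hF⟩ := pv_main_inv nb [] [] [] PySem.Dict.empty
    (fun x hx => absurd (PySem.Dict.getD_empty x 0) hx)
    (fun x => by rw [PySem.Dict.getD_empty])
  have hmid := hF (by simp)
  simp only [hB, hmid, pvA_loop2_eq_find, pvA_loop3_eq, pvA_loop4_eq, pvA_loop5_eq,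
    pvB_mid_eq_find, PySem.List.slice?_none_none_neg_one]
  simp
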